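-- pv_equiv track=rewrite | github.com/Maebara-K7/mahjong-tournament-calculator | cond_lib.py | format_as_intervals
-- ===== SOURCE A (Python) =====
-- def format_as_intervals(ok_pts, all_pts):
--     """将满足条件的点数列表格式化为区间字符串。"""
--     if not ok_pts:
--         return '✕'
--
--     if ok_pts == all_pts:
--         return '〇'
--
--     intervals = []
--     # 为了效率，创建一个从点数到其在 all_pts 中索引的映射
--     # 注意：这要求 all_pts 中的点是可哈希的（元组可以，列表不行）
--     point_to_index = {point: i for i, point in enumerate(all_pts)}
--
--     i = 0
--     while i < len(ok_pts):
--         start_pt = ok_pts[i]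
--
--         # 寻找连续区间的结尾
--         j = i
--         while j + 1 < len(ok_pts):
--             current_pt_idx = point_to_index.get(ok_pts[j])
--             next_pt_idx = point_to_index.get(ok_pts[j + 1])
--
--             # 检查点是否在 all_pts 中，并且是否连续
--             if current_pt_idx is not None and next_pt_idx is not None and next_pt_idx == current_pt_idx + 1:
--                 j += 1
--             else:
--                 # 如果点不在 all_pts 中或不连续，则区间在此处断开
--                 break
--
--         end_pt = ok_pts[j]
--
--         # 检查区间的起止点是否是 all_pts 的“自然”边界
--         is_first_block = (start_pt == all_pts[0])
--         is_last_block = (end_pt == all_pts[-1])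
--
--         # 根据是否为边界来决定格式
--         if is_first_block and start_pt != end_pt:
--             intervals.append(f'<= {end_pt}')
--         elif is_last_block and start_pt != end_pt:
--             intervals.append(f'>= {start_pt}')
--         elif start_pt == end_pt:
--             intervals.append(f"== {start_pt}")
--         else:
--             intervals.append(f'{start_pt} ~ {end_pt}')
--
--         i = j + 1
--
--     return " 或 ".join(intervals)
-- ===== SOURCE B (Python) =====
-- def format_as_intervals(ok_pts, all_pts):
--     """将满足条件的点数列表格式化为区间字符串。"""
--     if not ok_pts:
--         return '✕'
--     if ok_pts == all_pts:
--         return '〇'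
--
--     pos = {p: i for i, p in enumerate(all_pts)}
--     idxs = [pos.get(p) for p in ok_pts]
--     # cut[k] is True iff a run boundary falls between ok_pts[k] and ok_pts[k+1]
--     cut = [a is None or b is None or b != a + 1 for a, b in zip(idxs, idxs[1:])]
--     # run starts = points preceded by a boundary; run ends = points followed by one
--     starts = [p for p, c in zip(ok_pts, [True] + cut) if c]
--     ends = [p for p, c in zip(ok_pts, cut + [True]) if c]
--
--     first, last = all_pts[0], all_pts[-1]
--     parts = []
--     for s, e in zip(starts, ends):
--         if s == e:
--             parts.append(f'== {s}')
--         elif s == first: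
--             parts.append(f'<= {e}')
--         elif e == last:
--             parts.append(f'>= {s}')
--         else:
--             parts.append(f'{s} ~ {e}')
--     return ' 或 '.join(parts)
-- ===== Notes on version B (the rewrite author's own statement) =====
-- stated objective: alternative
-- what changed: A's greedy nested scan (outer while over run starts, inner while advancing to each run's end via dict lookups) is replaced by a declarative mask computation: precompute the index list, mark the boundary mask between adjacent points with one zip, project run starts (points after a boundary) and run ends (points before a boundary) as two filtered zips, and format the zip of those two lists; Pre_ excludes nonempty ok_pts with empty all_pts, where A raises IndexError at all_pts[0] (B raises there too).
import Mathlib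
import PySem

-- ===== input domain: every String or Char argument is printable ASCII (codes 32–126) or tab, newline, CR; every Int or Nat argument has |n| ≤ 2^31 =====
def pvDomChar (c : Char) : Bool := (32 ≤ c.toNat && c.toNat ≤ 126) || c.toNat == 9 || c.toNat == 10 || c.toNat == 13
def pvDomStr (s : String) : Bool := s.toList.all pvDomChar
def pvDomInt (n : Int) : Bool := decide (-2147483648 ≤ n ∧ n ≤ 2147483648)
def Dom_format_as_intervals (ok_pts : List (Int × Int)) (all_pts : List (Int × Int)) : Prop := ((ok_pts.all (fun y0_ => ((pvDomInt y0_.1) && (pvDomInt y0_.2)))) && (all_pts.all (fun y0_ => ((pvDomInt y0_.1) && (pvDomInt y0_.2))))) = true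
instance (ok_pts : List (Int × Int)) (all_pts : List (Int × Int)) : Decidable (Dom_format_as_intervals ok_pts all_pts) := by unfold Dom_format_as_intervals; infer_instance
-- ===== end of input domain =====

-- B replaces A's greedy nested scan (outer while over run starts, inner while finding each
-- run's end) by a declarative mask computation: a boundary mask between adjacent points,
-- two filtered zips projecting run starts and run ends, and a format pass over their zip.

-- helpers shared by both ports (the same Python expressions occur verbatim in A and B):
-- f'{point}' on an int pair renders as "(a, b)"
def pvPairStr (p : Int × Int) : String :=
  "(" ++ PySem.Int.toStr p.1 ++ ", " ++ PySem.Int.toStr p.2 ++ ")"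

-- {point: i for i, point in enumerate(all_pts)}  (later index wins on duplicates)
def pvIndex (all_pts : List (Int × Int)) : PySem.Dict (Int × Int) Int :=
  (PySem.List.enumerate all_pts 0).foldl (fun d iv => d.insert iv.2 iv.1) PySem.Dict.empty

-- 'a is not None and b is not None and b == a + 1'
def pvConsec (c n : Option Int) : Bool :=
  match c, n with
  | some a, some b => b == a + 1
  | _, _ => false

-- ===== PORT A =====
-- the inner 'while j + 1 < len(ok_pts)' loop: returns the final j.
-- `fuel` only makes the loop total; ok.length is always enough (the loop runs < ok.length times).
def pvInnerA (ok : List (Int × Int)) (idx : PySem.Dict (Int × Int) Int) : Nat → Nat → Nat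
  | 0, j => j
  | fuel + 1, j =>
    if j + 1 < ok.length then
      if pvConsec (idx.get? (ok.getD j (0, 0))) (idx.get? (ok.getD (j + 1) (0, 0)))
      then pvInnerA ok idx fuel (j + 1)
      else j
    else j

-- the branch ladder computing each interval string (uses all_pts[0], all_pts[-1])
def pvFmtA (all_pts : List (Int × Int)) (s e : Int × Int) : String :=
  if PySem.List.pyGet? all_pts 0 == some s && !(s == e) then "<= " ++ pvPairStr e
  else if PySem.List.pyGet? all_pts (-1) == some e && !(s == e) then ">= " ++ pvPairStr s
  else if s == e then "== " ++ pvPairStr s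
  else pvPairStr s ++ " ~ " ++ pvPairStr e

-- the outer 'while i < len(ok_pts)' loop accumulating `intervals`
-- (fuel again only bounds the loop; i strictly grows, so ok.length iterations suffice)
def pvOuterA (ok all_pts : List (Int × Int)) (idx : PySem.Dict (Int × Int) Int) :
    Nat → Nat → List String → List String
  | 0, _, intervals => intervals
  | fuel + 1, i, intervals =>
    if i < ok.length then
      let start_pt := ok.getD i (0, 0)
      let j := pvInnerA ok idx ok.length i
      let end_pt := ok.getD j (0, 0)
      pvOuterA ok all_pts idx fuel (j + 1) (intervals ++ [pvFmtA all_pts start_pt end_pt])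
    else intervals

def format_as_intervals (ok_pts : List (Int × Int)) (all_pts : List (Int × Int)) : String :=
  if ok_pts = [] then "✕"
  else if ok_pts = all_pts then "〇"
  else PySem.Str.join " 或 " (pvOuterA ok_pts all_pts (pvIndex all_pts) ok_pts.length 0 [])

-- ===== PORT B =====
-- cut = [a is None or b is None or b != a+1 for a, b in zip(idxs, idxs[1:])]  (idxs[1:] = drop 1, exact)
def pvCut (idxs : List (Option Int)) : List Bool :=
  (idxs.zip (idxs.drop 1)).map (fun ab => !pvConsec ab.1 ab.2)

-- starts = [p for p, c in zip(ok_pts, [True] + cut) if c]  (and dually for ends)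
def pvPick (pts : List (Int × Int)) (mask : List Bool) : List (Int × Int) :=
  ((pts.zip mask).filter (fun pc => pc.2)).map (fun pc => pc.1)

-- B's branch ladder ('== ' first; first/last are all_pts[0] / all_pts[-1], computed once)
def pvFmtB (first last : Option (Int × Int)) (s e : Int × Int) : String :=
  if s == e then "== " ++ pvPairStr s
  else if first == some s then "<= " ++ pvPairStr e
  else if last == some e then ">= " ++ pvPairStr s
  else pvPairStr s ++ " ~ " ++ pvPairStr e

def format_as_intervals_alt (ok_pts : List (Int × Int)) (all_pts : List (Int × Int)) : String :=
  if ok_pts = [] then "✕"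
  else if ok_pts = all_pts then "〇"
  else
    let pos := pvIndex all_pts
    let idxs := ok_pts.map pos.get?
    let cut := pvCut idxs
    let starts := pvPick ok_pts (true :: cut)
    let ends := pvPick ok_pts (cut ++ [true])
    let first := PySem.List.pyGet? all_pts 0
    let last := PySem.List.pyGet? all_pts (-1)
    PySem.Str.join " 或 " ((starts.zip ends).map (fun se => pvFmtB first last se.1 se.2))

-- ===== PRECONDITION & SPEC =====
-- Pre_ excludes exactly the inputs where Python A raises IndexError: a nonempty ok_pts with
-- an empty all_pts (A then evaluates all_pts[0]; B does too).
def Pre_format_as_intervals (ok_pts : List (Int × Int)) (all_pts : List (Int × Int)) : Prop :=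
  ok_pts = [] ∨ all_pts ≠ []
instance (ok_pts : List (Int × Int)) (all_pts : List (Int × Int)) : Decidable (Pre_format_as_intervals ok_pts all_pts) := by unfold Pre_format_as_intervals; infer_instance

def pvWitness_format_as_intervals : (List (Int × Int)) × (List (Int × Int)) :=
  ([((1 : Int), (2 : Int))], [((1 : Int), (2 : Int)), ((3 : Int), (4 : Int))])

def Spec_format_as_intervals (ok_pts : List (Int × Int)) (all_pts : List (Int × Int)) (out : String) : Prop := out = format_as_intervals_alt ok_pts all_pts
instance (ok_pts : List (Int × Int)) (all_pts : List (Int × Int)) (out : String) : Decidable (Spec_format_as_intervals ok_pts all_pts out) := by unfold Spec_format_as_intervals; infer_instance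

-- ===== CLAIM (what is proved, stated in full; the proofs are below) =====
def Claim_equal_format_as_intervals : Prop := ∀ (ok_pts : List (Int × Int)) (all_pts : List (Int × Int)), Dom_format_as_intervals ok_pts all_pts → Pre_format_as_intervals ok_pts all_pts → Spec_format_as_intervals ok_pts all_pts (format_as_intervals ok_pts all_pts)

-- ===== LEMMAS AND PROOFS =====

-- the common specification of a run decomposition: greedy maximal consecutive runs
def pvRunFrom (idx : PySem.Dict (Int × Int) Int) :
    (Int × Int) → Option Int → List (Int × Int) → (Int × Int) × List (Int × Int)
  | e, _, [] => (e, [])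
  | e, ei, q :: rest =>
    if pvConsec ei (idx.get? q) then pvRunFrom idx q (idx.get? q) rest else (e, q :: rest)

theorem pvRunFrom_len (idx : PySem.Dict (Int × Int) Int) (e : Int × Int) (ei : Option Int)
    (l : List (Int × Int)) : (pvRunFrom idx e ei l).2.length ≤ l.length := by
  induction l generalizing e ei with
  | nil => simp [pvRunFrom]
  | cons q rest ih =>
    rw [pvRunFrom]
    split
    · exact le_trans (ih q (idx.get? q)) (Nat.le_succ _)
    · exact le_refl _

def pvSpecRuns (idx : PySem.Dict (Int × Int) Int) :
    List (Int × Int) → List ((Int × Int) × (Int × Int))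
  | [] => []
  | p :: rest =>
    let r := pvRunFrom idx p (idx.get? p) rest
    (p, r.1) :: pvSpecRuns idx r.2
termination_by l => l.length
decreasing_by
  have := pvRunFrom_len idx p (idx.get? p) rest
  simp only [List.length_cons]; omega

-- ---- A side: the nested while-loops compute pvSpecRuns ----

theorem pvInnerA_ge (ok : List (Int × Int)) (idx : PySem.Dict (Int × Int) Int) (fuel j : Nat) :
    j ≤ pvInnerA ok idx fuel j := by
  induction fuel generalizing j with
  | zero => exact le_refl j
  | succ fuel ih =>
    rw [pvInnerA]
    split
    · split
      · exact le_trans (Nat.le_succ j) (ih (j + 1))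
      · exact le_refl j
    · exact le_refl j

theorem pvInnerA_runFrom (ok : List (Int × Int)) (idx : PySem.Dict (Int × Int) Int)
    (fuel j : Nat) (h : j < ok.length) (hf : ok.length ≤ fuel + j + 1) :
    pvRunFrom idx (ok.getD j (0, 0)) (idx.get? (ok.getD j (0, 0))) (ok.drop (j + 1))
      = (ok.getD (pvInnerA ok idx fuel j) (0, 0), ok.drop (pvInnerA ok idx fuel j + 1)) := by
  induction fuel generalizing j with
  | zero =>
    have : ok.drop (j + 1) = [] := List.drop_eq_nil_of_le (by omega)
    rw [pvInnerA, this, pvRunFrom]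
  | succ fuel ih =>
    rw [pvInnerA]
    by_cases hj : j + 1 < ok.length
    · rw [List.drop_eq_getElem_cons hj, pvRunFrom]
      have hg : ok.getD (j + 1) (0, 0) = ok[j + 1] := List.getD_eq_getElem ok (0, 0) hj
      simp only [if_pos hj, ← hg]
      by_cases hc : pvConsec (idx.get? (ok.getD j (0, 0))) (idx.get? (ok.getD (j + 1) (0, 0))) = true
      · rw [if_pos hc, if_pos hc]
        exact ih (j + 1) hj (by omega)
      · rw [if_neg hc, if_neg hc, hg, ← List.drop_eq_getElem_cons hj]
    · rw [if_neg hj]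
      have : ok.drop (j + 1) = [] := List.drop_eq_nil_of_le (by omega)
      rw [this, pvRunFrom]

theorem pvOuterA_spec (ok all_pts : List (Int × Int)) (idx : PySem.Dict (Int × Int) Int)
    (fuel : Nat) (i : Nat) (acc : List String) (hf : ok.length ≤ fuel + i) :
    pvOuterA ok all_pts idx fuel i acc
      = acc ++ (pvSpecRuns idx (ok.drop i)).map (fun r => pvFmtA all_pts r.1 r.2) := by
  induction fuel generalizing i acc with
  | zero =>
    have : ok.drop i = [] := List.drop_eq_nil_of_le (by omega)
    rw [pvOuterA, this, pvSpecRuns]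
    simp
  | succ fuel ih =>
    rw [pvOuterA]
    by_cases h : i < ok.length
    · rw [if_pos h]
      have hd : ok.drop i = ok.getD i (0, 0) :: ok.drop (i + 1) := by
        rw [List.drop_eq_getElem_cons h, List.getD_eq_getElem ok (0, 0) h]
      rw [hd, pvSpecRuns, pvInnerA_runFrom ok idx ok.length i h (by omega)]
      have hge := pvInnerA_ge ok idx ok.length i
      rw [ih (pvInnerA ok idx ok.length i + 1)
          (acc ++ [pvFmtA all_pts (ok.getD i (0, 0)) (ok.getD (pvInnerA ok idx ok.length i) (0, 0))])
          (by omega)]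
      simp
    · rw [if_neg h]
      have : ok.drop i = [] := List.drop_eq_nil_of_le (by omega)
      rw [this, pvSpecRuns]
      simp

-- ---- B side: the starts/ends mask projection zips to pvSpecRuns ----

theorem pvPick_cons_true (p : Int × Int) (pts : List (Int × Int)) (mask : List Bool) :
    pvPick (p :: pts) (true :: mask) = p :: pvPick pts mask := by
  simp [pvPick]

theorem pvPick_cons_false (p : Int × Int) (pts : List (Int × Int)) (mask : List Bool) :
    pvPick (p :: pts) (false :: mask) = pvPick pts mask := by
  simp [pvPick]

theorem pvMask_spec (idx : PySem.Dict (Int × Int) Int) (p : Int × Int)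
    (rest : List (Int × Int)) :
    (pvPick (p :: rest) (true :: pvCut ((p :: rest).map idx.get?))).zip
      (pvPick (p :: rest) (pvCut ((p :: rest).map idx.get?) ++ [true]))
      = pvSpecRuns idx (p :: rest) := by
  induction rest generalizing p with
  | nil =>
    simp [pvCut, pvPick, pvSpecRuns, pvRunFrom]
  | cons q rest' ih =>
    have hcut : pvCut ((p :: q :: rest').map idx.get?)
        = (!pvConsec (idx.get? p) (idx.get? q)) :: pvCut ((q :: rest').map idx.get?) := by
      simp [pvCut]
    rw [hcut]
    have hruns : pvSpecRuns idx (p :: q :: rest')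
        = (p, (pvRunFrom idx p (idx.get? p) (q :: rest')).1)
          :: pvSpecRuns idx (pvRunFrom idx p (idx.get? p) (q :: rest')).2 := by
      rw [pvSpecRuns]
    by_cases hc : pvConsec (idx.get? p) (idx.get? q) = true
    · -- glued: p's run continues into q; only the head start differs from rest's runs
      have hrun : pvRunFrom idx p (idx.get? p) (q :: rest')
          = pvRunFrom idx q (idx.get? q) rest' := by rw [pvRunFrom, if_pos hc]
      have hspecq : pvSpecRuns idx (q :: rest')
          = (q, (pvRunFrom idx q (idx.get? q) rest').1)
            :: pvSpecRuns idx (pvRunFrom idx q (idx.get? q) rest').2 := by rw [pvSpecRuns]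
      have := ih q
      rw [hspecq, pvPick_cons_true] at this
      rcases hE : pvPick (q :: rest') (pvCut ((q :: rest').map idx.get?) ++ [true]) with _ | ⟨E0, E⟩
      · rw [hE] at this; simp at this
      · rw [hE] at this
        simp only [List.zip_cons_cons, List.cons.injEq, Prod.mk.injEq] at this
        rw [hruns, hrun, hc]
        simp only [Bool.not_true, List.cons_append, pvPick_cons_true, pvPick_cons_false]
        rw [hE, List.zip_cons_cons, this.1.2, this.2]
    · -- boundary between p and q: p is a singleton start and end
      have hcb : pvConsec (idx.get? p) (idx.get? q) = false := by
        cases hx : pvConsec (idx.get? p) (idx.get? q) with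
        | false => rfl
        | true => exact absurd hx hc
      have hrun : pvRunFrom idx p (idx.get? p) (q :: rest')
          = (p, q :: rest') := by rw [pvRunFrom, if_neg hc]
      rw [hruns, hrun, hcb]
      simp only [Bool.not_false, List.cons_append, pvPick_cons_true]
      rw [List.zip_cons_cons, ← pvPick_cons_true q rest' (pvCut ((q :: rest').map idx.get?)), ih q]

-- the two branch ladders agree pointwise (the boundary branches require s ≠ e)
theorem pvFmt_eq (all_pts : List (Int × Int)) (s e : Int × Int) :
    pvFmtA all_pts s e
      = pvFmtB (PySem.List.pyGet? all_pts 0) (PySem.List.pyGet? all_pts (-1)) s e := by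
  by_cases hse : s = e
  · subst hse; simp [pvFmtA, pvFmtB]
  · have : (s == e) = false := by simp [hse]
    simp [pvFmtA, pvFmtB, this]

-- ===== VERDICT (by name: the statement is the Claim_ definition above) =====
theorem format_as_intervals_spec : Claim_equal_format_as_intervals := by
  intro ok_pts all_pts _ _
  unfold Spec_format_as_intervals
  cases ok_pts with
  | nil => rfl
  | cons p0 rest =>
    unfold format_as_intervals format_as_intervals_alt
    by_cases heq : p0 :: rest = all_pts
    · rw [if_neg (List.cons_ne_nil p0 rest), if_pos heq, if_neg (List.cons_ne_nil p0 rest), if_pos heq]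
    · rw [if_neg (List.cons_ne_nil p0 rest), if_neg heq, if_neg (List.cons_ne_nil p0 rest), if_neg heq]
      dsimp only
      rw [pvOuterA_spec (p0 :: rest) all_pts (pvIndex all_pts) (p0 :: rest).length 0 [] (by omega)]
      rw [List.drop_zero, ← pvMask_spec (pvIndex all_pts) p0 rest]
      simp [pvFmt_eq]
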